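-- pv_equiv track=rewrite | github.com/wangtonylyan/Algorithms | algorithms/dynamic/stock.py | algo1
-- ===== SOURCE A (Python) =====
-- def algo1(lst):
--     maxval, minval, maxdiff = lst[0], lst[0], 0
--
--     for i in range(1, len(lst)):
--         if lst[i - 1] > lst[i]:
--             maxdiff += maxval - minval
--             maxval = minval = lst[i]
--         else:
--             maxval = lst[i]
--
--     return maxdiff + (maxval - minval)
-- ===== SOURCE B (Python) =====
-- def algo1(lst):
--     prev = lst[0]
--     total = 0
--     for x in lst[1:]:
--         if x > prev:
--             total += x - prev
--         prev = x
--     return total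
-- ===== Notes on version B (the rewrite author's own statement) =====
-- stated objective: simpler
-- what changed: Replaces the run-tracking state (maxval/minval/maxdiff with end-of-run flushes) by directly accumulating each positive consecutive difference x - prev in a single accumulator.
import Mathlib
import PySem

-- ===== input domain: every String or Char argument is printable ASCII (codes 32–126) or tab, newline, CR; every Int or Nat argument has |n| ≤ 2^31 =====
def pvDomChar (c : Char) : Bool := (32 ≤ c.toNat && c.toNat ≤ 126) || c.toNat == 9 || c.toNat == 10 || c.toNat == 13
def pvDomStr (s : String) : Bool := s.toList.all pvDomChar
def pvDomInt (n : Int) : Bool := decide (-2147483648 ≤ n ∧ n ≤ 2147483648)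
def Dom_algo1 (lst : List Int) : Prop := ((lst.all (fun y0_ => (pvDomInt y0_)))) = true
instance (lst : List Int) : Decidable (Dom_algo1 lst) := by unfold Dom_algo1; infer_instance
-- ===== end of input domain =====

-- B replaces A's run-tracking (maxval/minval/maxdiff) by directly summing positive consecutive differences; objective: simpler.

-- ===== PORT A =====
def algo1 (lst : List Int) : Int :=
  let st := (PySem.List.pyRange 1 (lst.length : Int) 1).foldl
    (fun (s : Int × Int × Int) i =>
      if PySem.List.pyGetD lst (i - 1) 0 > PySem.List.pyGetD lst i 0 then
        (PySem.List.pyGetD lst i 0, PySem.List.pyGetD lst i 0, s.2.2 + (s.1 - s.2.1))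
      else
        (PySem.List.pyGetD lst i 0, s.2.1, s.2.2))
    (PySem.List.pyGetD lst 0 0, PySem.List.pyGetD lst 0 0, 0)
  st.2.2 + (st.1 - st.2.1)

-- ===== PORT B =====
def algo1_alt (lst : List Int) : Int :=
  let st := (PySem.List.slice lst (some 1) none).foldl
    (fun (s : Int × Int) x => (x, if x > s.1 then s.2 + (x - s.1) else s.2))
    (PySem.List.pyGetD lst 0 0, 0)
  st.2

-- ===== PRECONDITION & SPEC =====
-- Pre_ excludes only the empty list, on which A (lst[0]) raises IndexError (B raises there too).
def Pre_algo1 (lst : List Int) : Prop := lst ≠ []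
instance (lst : List Int) : Decidable (Pre_algo1 lst) := by unfold Pre_algo1; infer_instance
def pvWitness_algo1 : List Int := ([1, 7, 4, 9])

def Spec_algo1 (lst : List Int) (out : Int) : Prop := out = algo1_alt lst
instance (lst : List Int) (out : Int) : Decidable (Spec_algo1 lst out) := by unfold Spec_algo1; infer_instance

-- ===== CLAIM (what is proved, stated in full; the proofs are below) =====
def Claim_equal_algo1 : Prop := ∀ (lst : List Int), Dom_algo1 lst → Pre_algo1 lst → Spec_algo1 lst (algo1 lst)

-- ===== LEMMAS AND PROOFS =====

-- B's loop body and A's loop body, named for the proofs (identical to the lambdas in the ports).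
def bstep (s : Int × Int) (x : Int) : Int × Int :=
  (x, if x > s.1 then s.2 + (x - s.1) else s.2)

def astep (lst : List Int) (s : Int × Int × Int) (i : Int) : Int × Int × Int :=
  if PySem.List.pyGetD lst (i - 1) 0 > PySem.List.pyGetD lst i 0 then
    (PySem.List.pyGetD lst i 0, PySem.List.pyGetD lst i 0, s.2.2 + (s.1 - s.2.1))
  else
    (PySem.List.pyGetD lst i 0, s.2.1, s.2.2)

-- shifting B's accumulator out of the fold
lemma bshift (xs : List Int) : ∀ (p t : Int),
    (xs.foldl bstep (p, t)).2 = t + (xs.foldl bstep (p, 0)).2 := by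
  induction xs with
  | nil => intro p t; simp
  | cons x xs ih =>
    intro p t
    simp only [List.foldl_cons, bstep]
    by_cases h : x > p
    · simp only [if_pos h]
      rw [ih x (t + (x - p)), ih x (0 + (x - p))]
      ring
    · simp only [if_neg h]
      exact ih x t

lemma main_loop (lst : List Int) : ∀ (k a : Nat) (mn md : Int),
    a + k = lst.length → 1 ≤ a →
    (let st := (PySem.List.pyRange (a : Int) (lst.length : Int) 1).foldl (astep lst)
        (lst.getD (a - 1) 0, mn, md)
     st.2.2 + (st.1 - st.2.1))
    = md + (lst.getD (a - 1) 0 - mn) + ((lst.drop a).foldl bstep (lst.getD (a - 1) 0, 0)).2 := by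
  intro k
  induction k with
  | zero =>
    intro a mn md hlen ha
    have h1 : PySem.List.pyRange (a : Int) (lst.length : Int) 1 = [] := by
      apply PySem.List.pyRange_one_eq_nil; omega
    have h2 : lst.drop a = [] := by
      apply List.drop_eq_nil_of_le; omega
    simp [h1, h2]
  | succ k ih =>
    intro a mn md hlen ha
    have halt : a < lst.length := by omega
    have h1 : PySem.List.pyRange (a : Int) (lst.length : Int) 1
        = (a : Int) :: PySem.List.pyRange ((a : Int) + 1) (lst.length : Int) 1 := by
      apply PySem.List.pyRange_one_cons; exact_mod_cast halt
    have hdrop : lst.drop a = lst[a] :: lst.drop (a + 1) := List.drop_eq_getElem_cons halt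
    have hga : PySem.List.pyGetD lst (a : Int) 0 = lst[a] := by
      rw [PySem.List.pyGetD_natCast]; exact List.getD_eq_getElem _ _ halt
    have hga1 : PySem.List.pyGetD lst ((a : Int) - 1) 0 = lst.getD (a - 1) 0 := by
      have : (a : Int) - 1 = ((a - 1 : Nat) : Int) := by omega
      rw [this, PySem.List.pyGetD_natCast]
    have hcast : ((a : Int) + 1) = ((a + 1 : Nat) : Int) := by omega
    have hpred : (a + 1) - 1 = a := by omega
    have ihct := ih (a + 1) -- instantiated below per branch
    simp only [h1, List.foldl_cons]
    rw [hdrop, List.foldl_cons]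
    simp only [astep, hga, hga1]
    by_cases hc : lst.getD (a - 1) 0 > lst[a]
    · simp only [if_pos hc]
      rw [hcast]
      have := ih (a + 1) lst[a] (md + (lst.getD (a - 1) 0 - mn)) (by omega) (by omega)
      simp only [hpred] at this
      rw [List.getD_eq_getElem _ _ halt] at this
      simp only [this]
      simp only [bstep, if_neg (by omega : ¬ lst[a] > lst.getD (a - 1) 0)]
      ring
    · simp only [if_neg hc]
      rw [hcast]
      have := ih (a + 1) mn md (by omega) (by omega)
      simp only [hpred] at this
      rw [List.getD_eq_getElem _ _ halt] at this
      simp only [this]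
      simp only [bstep]
      by_cases hg : lst[a] > lst.getD (a - 1) 0
      · simp only [if_pos hg]
        rw [bshift (lst.drop (a + 1)) lst[a] (0 + (lst[a] - lst.getD (a - 1) 0))]
        ring
      · simp only [if_neg hg]
        have : lst[a] = lst.getD (a - 1) 0 := by omega
        rw [this]

-- ===== VERDICT (by name: the statement is the Claim_ definition above) =====
theorem algo1_spec : Claim_equal_algo1 := by
  intro lst _ hpre
  unfold Spec_algo1 algo1 algo1_alt
  have hlen : 1 ≤ lst.length := by
    cases lst with
    | nil => exact absurd rfl hpre
    | cons x xs => simp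
  have h := main_loop lst (lst.length - 1) 1 (PySem.List.pyGetD lst 0 0)
      0 (by omega) (by omega)
  have hg0 : lst.getD (1 - 1) 0 = PySem.List.pyGetD lst 0 0 := by
    simp [PySem.List.pyGetD_zero]
  simp only [hg0] at h
  simp only [Nat.cast_one] at h
  rw [PySem.List.slice_from_one]
  have htail : lst.tail = lst.drop 1 := (List.drop_one (l := lst)).symm
  rw [htail]
  have hA : astep lst = (fun (s : Int × Int × Int) i =>
      if PySem.List.pyGetD lst (i - 1) 0 > PySem.List.pyGetD lst i 0 then
        (PySem.List.pyGetD lst i 0, PySem.List.pyGetD lst i 0, s.2.2 + (s.1 - s.2.1))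
      else
        (PySem.List.pyGetD lst i 0, s.2.1, s.2.2)) := rfl
  have hB : bstep = (fun (s : Int × Int) x => (x, if x > s.1 then s.2 + (x - s.1) else s.2)) := rfl
  rw [← hA, ← hB]
  simp only [h]
  ring
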